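-- pv_equiv track=rewrite | github.com/at-aaims/OmniFed | src/flora/utils/results_display.py | _compute_level_boundaries
-- ===== SOURCE A (Python) =====
-- from typing import Any, Dict, List, Optional, Set, Tuple
--
-- def _compute_level_boundaries(
--     position_matrix: List[Tuple[Optional[int], ...]], levels
-- ) -> Dict[int, Dict[str, int]]:
--     """Pre-compute boundary positions for visual styling."""
--     level_boundaries = {}
--     for level_idx, level in enumerate(levels):
--         level_values = []
--         for position_tuple in position_matrix:
--             if (
--                 level_idx < len(position_tuple)
--                 and position_tuple[level_idx] is not None
--             ):
--                 level_values.append(position_tuple[level_idx])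
--
--         if level_values:
--             unique_values = sorted(set(level_values))
--             level_boundaries[level_idx] = {
--                 "first": unique_values[0],
--                 "last": unique_values[-1],
--             }
--     return level_boundaries
-- ===== SOURCE B (Python) =====
-- def _compute_level_boundaries(position_matrix, levels):
--     n = len(levels)
--     extrema = {}
--     for position_tuple in position_matrix:
--         for level_idx in range(min(n, len(position_tuple))):
--             v = position_tuple[level_idx]
--             if v is None:
--                 continue
--             if level_idx in extrema:
--                 mn, mx = extrema[level_idx]
--                 extrema[level_idx] = (min(mn, v), max(mx, v))
--             else:
--                 extrema[level_idx] = (v, v)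
--     return {
--         i: {"first": extrema[i][0], "last": extrema[i][1]}
--         for i in range(n)
--         if i in extrema
--     }
-- ===== Notes on version B (the rewrite author's own statement) =====
-- stated objective: faster
-- what changed: Replaces A's per-level rescan of the whole matrix (and sort of each level's deduplicated values) with a single pass over the rows maintaining running (min,max) per level index, then one pass over the level indices to emit the result.
import Mathlib
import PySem

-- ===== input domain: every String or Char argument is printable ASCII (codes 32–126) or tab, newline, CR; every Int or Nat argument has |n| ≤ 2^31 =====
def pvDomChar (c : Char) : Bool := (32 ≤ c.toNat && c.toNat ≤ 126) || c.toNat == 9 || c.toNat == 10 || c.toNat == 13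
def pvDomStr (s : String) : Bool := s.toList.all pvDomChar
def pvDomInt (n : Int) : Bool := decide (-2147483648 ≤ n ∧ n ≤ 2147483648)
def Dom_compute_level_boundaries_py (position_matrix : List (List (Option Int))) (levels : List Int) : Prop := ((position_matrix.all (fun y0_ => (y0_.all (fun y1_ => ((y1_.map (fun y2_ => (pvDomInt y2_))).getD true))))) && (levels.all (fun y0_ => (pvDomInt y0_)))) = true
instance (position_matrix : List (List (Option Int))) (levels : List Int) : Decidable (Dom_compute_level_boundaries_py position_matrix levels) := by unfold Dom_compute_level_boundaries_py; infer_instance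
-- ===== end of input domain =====

-- B replaces A's per-level rescan of the matrix (plus a sort of each level's deduplicated
-- values) with one pass over the rows keeping running (min,max) per level index.

-- ===== PORT A =====
-- A's inner loop: collect the non-None values of column level_idx.  The match on pyGet?
-- is exact for A's 'level_idx < len(position_tuple) and position_tuple[level_idx] is not None':
-- level_idx comes from enumerate so it is ≥ 0, hence pyGet? = some ↔ level_idx < len row.
def pvAInner (position_matrix : List (List (Option Int))) (level_idx : Int) : List Int :=
  position_matrix.foldl (fun lv row =>
    match PySem.List.pyGet? row level_idx with
    | some (some v) => lv ++ [v]
    | _ => lv) []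

def pvAStep (position_matrix : List (List (Option Int)))
    (acc : PySem.Dict Int (List (String × Int))) (p : Int × Int) :
    PySem.Dict Int (List (String × Int)) :=
  let level_values := pvAInner position_matrix p.1
  if level_values ≠ [] then
    let unique := PySem.List.sorted (PySem.Set.ofList level_values) (fun x => x) false
    match PySem.List.pyGet? unique 0, PySem.List.pyGet? unique (-1) with
    | some f, some l => acc.insert p.1 [("first", f), ("last", l)]
    | _, _ => acc        -- unreachable: unique is nonempty
  else acc

def compute_level_boundaries_py (position_matrix : List (List (Option Int))) (levels : List Int) : List (Int × List (String × Int)) :=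
  ((PySem.List.enumerate levels 0).foldl (pvAStep position_matrix) PySem.Dict.empty).items

-- ===== PORT B =====
-- one row of B's single pass: update the running (min,max) of each level index the row covers
def pvBRow (n : Nat) (d : PySem.Dict Int (Int × Int)) (row : List (Option Int)) :
    PySem.Dict Int (Int × Int) :=
  (List.range (min n row.length)).foldl (fun d i =>
    match row.getD i none with
    | none => d
    | some v =>
      match d.get? (i : Int) with
      | some (mn, mx) => d.insert (i : Int) (min mn v, max mx v)
      | none => d.insert (i : Int) (v, v)) d

-- Source B's final dict comprehension inserts fresh strictly increasing keys, so its items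
-- list is exactly this filterMap over range(n)
def compute_level_boundaries_py_alt (position_matrix : List (List (Option Int))) (levels : List Int) : List (Int × List (String × Int)) :=
  let n := levels.length
  let extrema := position_matrix.foldl (pvBRow n) PySem.Dict.empty
  (List.range n).filterMap (fun (i : Nat) =>
    (extrema.get? (i : Int)).map (fun p => ((i : Int), [("first", p.1), ("last", p.2)])))

-- ===== PRECONDITION & SPEC =====
def Spec_compute_level_boundaries_py (position_matrix : List (List (Option Int))) (levels : List Int) (out : List (Int × List (String × Int))) : Prop := out = compute_level_boundaries_py_alt position_matrix levels
instance (position_matrix : List (List (Option Int))) (levels : List Int) (out : List (Int × List (String × Int))) : Decidable (Spec_compute_level_boundaries_py position_matrix levels out) := by unfold Spec_compute_level_boundaries_py; infer_instance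

-- ===== CLAIM (what is proved, stated in full; the proofs are below) =====
def Claim_equal_compute_level_boundaries_py : Prop := ∀ (position_matrix : List (List (Option Int))) (levels : List Int), Dom_compute_level_boundaries_py position_matrix levels → Spec_compute_level_boundaries_py position_matrix levels (compute_level_boundaries_py position_matrix levels)

-- ===== LEMMAS AND PROOFS =====

-- the values of column i, and the running-extrema abstraction both sides reduce to
def pvCol (pm : List (List (Option Int))) (i : Nat) : List Int :=
  pm.filterMap (fun row => row.getD i none)

def pvStep1 (s : Option (Int × Int)) (v : Int) : Option (Int × Int) :=
  match s with
  | none => some (v, v)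
  | some (mn, mx) => some (min mn v, max mx v)

def pvMerge (s : Option (Int × Int)) (vs : List Int) : Option (Int × Int) :=
  vs.foldl pvStep1 s

def pvFmt (i : Nat) (p : Int × Int) : Int × List (String × Int) :=
  ((i : Int), [("first", p.1), ("last", p.2)])

theorem pvCol_cons (r : List (Option Int)) (pm : List (List (Option Int))) (i : Nat) :
    pvCol (r :: pm) i = (r.getD i none).toList ++ pvCol pm i := by
  simp only [pvCol, List.filterMap_cons, List.getD_eq_getElem?_getD]
  cases r[i]?.getD none <;> simp

theorem pvMerge_append (s : Option (Int × Int)) (a b : List Int) :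
    pvMerge s (a ++ b) = pvMerge (pvMerge s a) b := List.foldl_append

theorem pvMerge_some (vs : List Int) (mn mx : Int) :
    pvMerge (some (mn, mx)) vs = some (vs.foldl min mn, vs.foldl max mx) := by
  induction vs generalizing mn mx with
  | nil => rfl
  | cons v t ih => simpa [pvMerge, pvStep1] using ih (min mn v) (max mx v)

theorem pvMerge_cons (v : Int) (t : List Int) :
    pvMerge none (v :: t) = some (t.foldl min v, t.foldl max v) := by
  simpa [pvMerge, pvStep1] using pvMerge_some t v v

theorem pvFoldlMin_mem (t : List Int) (v : Int) : t.foldl min v ∈ v :: t := by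
  induction t generalizing v with
  | nil => simp
  | cons h t ih =>
    rw [List.foldl_cons]
    rcases List.mem_cons.1 (ih (min v h)) with h1 | h1
    · rw [h1]
      rcases le_total v h with hle | hle
      · rw [min_eq_left hle]; exact List.mem_cons_self
      · rw [min_eq_right hle]; exact List.mem_cons_of_mem _ List.mem_cons_self
    · exact List.mem_cons_of_mem _ (List.mem_cons_of_mem _ h1)

theorem pvFoldlMin_le_init (t : List Int) (v : Int) : t.foldl min v ≤ v := by
  induction t generalizing v with
  | nil => simp
  | cons h t ih => exact le_trans (ih (min v h)) (min_le_left _ _)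

theorem pvFoldlMin_le (t : List Int) (v x : Int) (hx : x ∈ v :: t) : t.foldl min v ≤ x := by
  induction t generalizing v with
  | nil =>
    have hxv : x = v := by simpa using hx
    simp [hxv]
  | cons h t ih =>
    rw [List.foldl_cons]
    rcases List.mem_cons.1 hx with h1 | h1
    · rw [h1]; exact le_trans (pvFoldlMin_le_init t (min v h)) (min_le_left _ _)
    · rcases List.mem_cons.1 h1 with h2 | h2
      · rw [h2]; exact le_trans (pvFoldlMin_le_init t (min v h)) (min_le_right _ _)
      · exact ih (min v h) (List.mem_cons_of_mem _ h2)

theorem pvFoldlMax_mem (t : List Int) (v : Int) : t.foldl max v ∈ v :: t := by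
  induction t generalizing v with
  | nil => simp
  | cons h t ih =>
    rw [List.foldl_cons]
    rcases List.mem_cons.1 (ih (max v h)) with h1 | h1
    · rw [h1]
      rcases le_total v h with hle | hle
      · rw [max_eq_right hle]; exact List.mem_cons_of_mem _ List.mem_cons_self
      · rw [max_eq_left hle]; exact List.mem_cons_self
    · exact List.mem_cons_of_mem _ (List.mem_cons_of_mem _ h1)

theorem pvFoldlMax_ge_init (t : List Int) (v : Int) : v ≤ t.foldl max v := by
  induction t generalizing v with
  | nil => simp
  | cons h t ih => exact le_trans (le_max_left _ _) (ih (max v h))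

theorem pvFoldlMax_ge (t : List Int) (v x : Int) (hx : x ∈ v :: t) : x ≤ t.foldl max v := by
  induction t generalizing v with
  | nil =>
    have hxv : x = v := by simpa using hx
    simp [hxv]
  | cons h t ih =>
    rw [List.foldl_cons]
    rcases List.mem_cons.1 hx with h1 | h1
    · rw [h1]; exact le_trans (le_max_left _ _) (pvFoldlMax_ge_init t (max v h))
    · rcases List.mem_cons.1 h1 with h2 | h2
      · rw [h2]; exact le_trans (le_max_right _ _) (pvFoldlMax_ge_init t (max v h))
      · exact ih (max v h) (List.mem_cons_of_mem _ h2)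

theorem pvPairwise_le_getLast (u : List Int) (h : u ≠ []) (hp : u.Pairwise (· ≤ ·)) :
    ∀ y ∈ u, y ≤ u.getLast h := by
  induction u with
  | nil => cases h rfl
  | cons a t ih =>
    intro y hy
    cases t with
    | nil =>
      have hya : y = a := by simpa using hy
      simp [hya, List.getLast]
    | cons b t' =>
      have ha : ∀ z ∈ b :: t', a ≤ z := (List.pairwise_cons.1 hp).1
      have hp' : (b :: t').Pairwise (· ≤ ·) := (List.pairwise_cons.1 hp).2
      have hlast : (a :: b :: t').getLast h = (b :: t').getLast (by simp) := by
        simp [List.getLast]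
      rcases List.mem_cons.1 hy with h1 | h1
      · rw [hlast, h1]
        exact ha _ (List.getLast_mem _)
      · rw [hlast]
        exact ih (by simp) hp' y h1

-- A's sorted(set(vs))[0] / [-1] are the running min / max of vs
theorem pvSortedSet_head (v : Int) (t : List Int) :
    PySem.List.pyGet? (PySem.List.sorted (PySem.Set.ofList (v :: t)) (fun x => x) false) 0
      = some (t.foldl min v) := by
  cases hc : PySem.List.sorted (PySem.Set.ofList (v :: t)) (fun x => x) false with
  | nil =>
    exfalso
    have hv : v ∈ PySem.List.sorted (PySem.Set.ofList (v :: t)) (fun x => x) false := by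
      rw [PySem.List.mem_sorted]
      exact (PySem.Set.mem_ofList _ _).2 List.mem_cons_self
    rw [hc] at hv
    simp at hv
  | cons m t' =>
    have H := PySem.List.key_head_sorted_le _ _ hc
    have hmv : m ∈ v :: t := by
      have hm : m ∈ PySem.List.sorted (PySem.Set.ofList (v :: t)) (fun x => x) false := by
        rw [hc]; exact List.mem_cons_self
      rw [PySem.List.mem_sorted] at hm
      exact (PySem.Set.mem_ofList _ _).1 hm
    have h1 : m ≤ t.foldl min v :=
      H _ ((PySem.Set.mem_ofList _ _).2 (pvFoldlMin_mem t v))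
    have h2 : t.foldl min v ≤ m := pvFoldlMin_le t v m hmv
    rw [PySem.List.pyGet?_zero_cons, le_antisymm h2 h1]

theorem pvSortedSet_last (v : Int) (t : List Int) :
    PySem.List.pyGet? (PySem.List.sorted (PySem.Set.ofList (v :: t)) (fun x => x) false) (-1)
      = some (t.foldl max v) := by
  cases hc : PySem.List.sorted (PySem.Set.ofList (v :: t)) (fun x => x) false with
  | nil =>
    exfalso
    have hv : v ∈ PySem.List.sorted (PySem.Set.ofList (v :: t)) (fun x => x) false := by
      rw [PySem.List.mem_sorted]
      exact (PySem.Set.mem_ofList _ _).2 List.mem_cons_self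
    rw [hc] at hv
    simp at hv
  | cons m t' =>
    have hmem : ∀ x, x ∈ m :: t' ↔ x ∈ v :: t := by
      intro x
      rw [← hc, PySem.List.mem_sorted]
      exact PySem.Set.mem_ofList _ _
    have hp : (m :: t').Pairwise (· ≤ ·) := by
      have hp0 := PySem.List.sorted_pairwise (PySem.Set.ofList (v :: t)) (fun x => x)
      rw [hc] at hp0
      exact hp0
    have hne : (m :: t') ≠ ([] : List Int) := List.cons_ne_nil _ _
    have hlast_mem : (m :: t').getLast hne ∈ v :: t := (hmem _).1 (List.getLast_mem hne)
    have h1 : (m :: t').getLast hne ≤ t.foldl max v := pvFoldlMax_ge t v _ hlast_mem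
    have h2 : t.foldl max v ≤ (m :: t').getLast hne :=
      pvPairwise_le_getLast _ hne hp _ ((hmem _).2 (pvFoldlMax_mem t v))
    rw [PySem.List.pyGet?_neg_one, List.getLast?_eq_getLast_of_ne_nil hne,
      le_antisymm h1 h2]

-- A's inner loop computes the column values
theorem pvAInner_eq (pm : List (List (Option Int))) (i : Nat) :
    pvAInner pm ((i : Nat) : Int) = pvCol pm i := by
  suffices h : ∀ (pm : List (List (Option Int))) (acc : List Int),
      pm.foldl (fun lv row =>
        match PySem.List.pyGet? row ((i : Nat) : Int) with
        | some (some v) => lv ++ [v]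
        | _ => lv) acc = acc ++ pvCol pm i by
    simpa [pvAInner] using h pm []
  intro pm
  induction pm with
  | nil => intro acc; simp [pvCol]
  | cons r t ih =>
    intro acc
    rw [List.foldl_cons, ih, pvCol_cons]
    have hstep : (match PySem.List.pyGet? r ((i : Nat) : Int) with
        | some (some v) => acc ++ [v]
        | _ => acc) = acc ++ (r.getD i none).toList := by
      rw [PySem.List.pyGet?_natCast]
      rw [List.getD_eq_getElem?_getD]
      cases h1 : r[i]? with
      | none => simp
      | some o => cases o <;> simp
    rw [hstep, List.append_assoc]

-- the canonical per-level entry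
def pvEntry (pm : List (List (Option Int))) (i : Nat) : Option (Int × List (String × Int)) :=
  (pvMerge none (pvCol pm i)).map (pvFmt i)

-- A's fold over enumerate appends one entry per level index with column values
theorem pvA_fold (pm : List (List (Option Int))) :
    ∀ (lvls : List Int) (s : Nat) (d : PySem.Dict Int (List (String × Int))),
      (∀ k ∈ d.keys, k < (s : Int)) →
      ((PySem.List.enumerate lvls (s : Int)).foldl (pvAStep pm) d).items
        = d.items ++ (List.range' s lvls.length).filterMap (pvEntry pm) := by
  intro lvls
  induction lvls with
  | nil => intro s d _; simp [PySem.List.enumerate_nil]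
  | cons x xs ih =>
    intro s d hd
    rw [PySem.List.enumerate_cons, List.foldl_cons]
    have hstep : pvAStep pm d ((s : Int), x)
        = match pvEntry pm s with
          | none => d
          | some e => d.insert (s : Int) e.2 := by
      unfold pvAStep
      simp only []
      rw [pvAInner_eq pm s]
      cases hc : pvCol pm s with
      | nil => simp [pvEntry, hc, pvMerge]
      | cons v t =>
        simp only [pvEntry, hc, pvMerge_cons, Option.map_some, pvFmt]
        rw [if_pos (by simp), pvSortedSet_head v t, pvSortedSet_last v t]
    have hnotmem : d.contains (s : Int) = false := by
      cases h : d.contains (s : Int)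
      · rfl
      · exfalso
        have hmem := (PySem.Dict.contains_iff_mem_keys d _).1 h
        exact absurd (hd _ hmem) (by omega)
    have hcast : ((s : Int) + 1) = (((s + 1 : Nat)) : Int) := by push_cast; ring
    cases he : pvEntry pm s with
    | none =>
      rw [hstep, he]
      rw [hcast, ih (s + 1) d (fun k hk => lt_trans (hd k hk) (by push_cast; omega))]
      simp only [List.length_cons]
      rw [List.range'_succ, List.filterMap_cons, he]
    | some e =>
      rw [hstep, he]
      have hkeys : (d.insert (s : Int) e.2).keys = d.keys ++ [(s : Int)] :=
        PySem.Dict.keys_insert_of_not_contains d _ hnotmem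
      have hinv : ∀ k ∈ (d.insert (s : Int) e.2).keys, k < ((s + 1 : Nat) : Int) := by
        intro k hk
        rw [hkeys] at hk
        rcases List.mem_append.1 hk with hk1 | hk1
        · have := hd k hk1; push_cast; omega
        · simp at hk1; rw [hk1]; push_cast; omega
      rw [hcast, ih (s + 1) _ hinv, PySem.Dict.items_insert_of_not_contains d _ hnotmem]
      have he1 : e.1 = (s : Int) := by
        have he' := he
        unfold pvEntry at he'
        cases hm : pvMerge none (pvCol pm s) with
        | none => rw [hm] at he'; simp at he'
        | some p =>
          rw [hm] at he'
          simp only [Option.map_some, pvFmt, Option.some.injEq] at he'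
          rw [← he']
      have hee : ((s : Int), e.2) = e := by rw [← he1]
      simp only [List.length_cons]
      rw [List.range'_succ, List.filterMap_cons, he]
      simp [hee, List.append_assoc]

-- B's row step, characterised through get?
theorem pvBRowAux (r : List (Option Int)) (d : PySem.Dict Int (Int × Int)) (m : Nat) :
    ∀ (i : Nat),
      ((List.range m).foldl (fun d i =>
          match r.getD i none with
          | none => d
          | some v =>
            match d.get? (i : Int) with
            | some (mn, mx) => d.insert (i : Int) (min mn v, max mx v)
            | none => d.insert (i : Int) (v, v)) d).get? (i : Int)
        = if i < m then pvMerge (d.get? (i : Int)) (r.getD i none).toList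
          else d.get? (i : Int) := by
  induction m with
  | zero => intro i; simp
  | succ m ihm =>
    intro i
    rw [List.range_succ, List.foldl_append, List.foldl_cons, List.foldl_nil]
    have hmm := ihm m
    rw [if_neg (by omega)] at hmm
    cases hg : r.getD m none with
    | none =>
      rw [ihm i]
      by_cases him : i < m
      · rw [if_pos him, if_pos (by omega)]
      · rw [if_neg him]
        by_cases hieq : i = m
        · subst hieq
          rw [if_pos (by omega), hg]
          rfl
        · rw [if_neg (by omega)]
    | some v =>
      rw [hmm]
      by_cases hieq : i = m
      · subst hieq
        rw [if_pos (by omega), hg]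
        cases hdg : d.get? ((i : Nat) : Int) with
        | none =>
          rw [PySem.Dict.get?_insert_self _ _ _]
          simp [pvMerge, pvStep1]
        | some p =>
          cases p with
          | mk mn mx =>
            rw [PySem.Dict.get?_insert_self _ _ _]
            simp [pvMerge, pvStep1]
      · have hne : ((i : Nat) : Int) ≠ ((m : Nat) : Int) := by
          intro hcc
          exact hieq (by exact_mod_cast hcc)
        cases hdg : d.get? ((m : Nat) : Int) with
        | none =>
          rw [PySem.Dict.get?_insert_of_ne _ _ hne, ihm i]
          by_cases him : i < m
          · rw [if_pos him, if_pos (by omega)]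
          · rw [if_neg him, if_neg (by omega)]
        | some p =>
          cases p with
          | mk mn mx =>
            rw [PySem.Dict.get?_insert_of_ne _ _ hne, ihm i]
            by_cases him : i < m
            · rw [if_pos him, if_pos (by omega)]
            · rw [if_neg him, if_neg (by omega)]

theorem pvBRow_get (n : Nat) (r : List (Option Int)) (d : PySem.Dict Int (Int × Int))
    (i : Nat) (hi : i < n) :
    (pvBRow n d r).get? (i : Int) = pvMerge (d.get? (i : Int)) (r.getD i none).toList := by
  unfold pvBRow
  rw [pvBRowAux r d (min n r.length) i]
  by_cases hir : i < r.length
  · rw [if_pos (by omega)]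
  · rw [if_neg (by omega)]
    have hnone : r.getD i none = none := by
      rw [List.getD_eq_getElem?_getD, List.getElem?_eq_none (by omega)]
      rfl
    rw [hnone]
    rfl

theorem pvB_fold (n : Nat) :
    ∀ (pm : List (List (Option Int))) (d : PySem.Dict Int (Int × Int)) (i : Nat), i < n →
      (pm.foldl (pvBRow n) d).get? (i : Int) = pvMerge (d.get? (i : Int)) (pvCol pm i) := by
  intro pm
  induction pm with
  | nil => intro d i _; simp [pvCol, pvMerge]
  | cons r t ih =>
    intro d i hi
    rw [List.foldl_cons, ih _ i hi, pvBRow_get n r d i hi, pvCol_cons, pvMerge_append]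

-- ===== VERDICT (by name: the statement is the Claim_ definition above) =====
theorem compute_level_boundaries_py_spec : Claim_equal_compute_level_boundaries_py := by
  unfold Claim_equal_compute_level_boundaries_py
  intro pm levels _
  unfold Spec_compute_level_boundaries_py
  unfold compute_level_boundaries_py compute_level_boundaries_py_alt
  have hA := pvA_fold pm levels 0 PySem.Dict.empty
    (by intro k hk; rw [PySem.Dict.keys_empty] at hk; simp at hk)
  rw [show ((0 : Nat) : Int) = (0 : Int) by norm_num] at hA
  rw [hA]
  simp only [show (PySem.Dict.empty : PySem.Dict Int (List (String × Int))).items = [] from rfl,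
    List.nil_append]
  rw [← List.range_eq_range']
  apply List.filterMap_congr
  intro i hi
  have hin : i < levels.length := List.mem_range.1 hi
  rw [pvEntry, pvB_fold levels.length pm PySem.Dict.empty i hin, PySem.Dict.get?_empty]
  rfl
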